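-- pv_equiv track=rewrite | github.com/Tamada4a/SimovinARMA | Python/main.py | equationsMA
-- ===== SOURCE A (Python) =====
-- def equationsMA(seq, R):
--     a = []
--     factor_list = []
--
--     n = len(seq) - 1
--
--     for elem in seq:
--         a.append(elem)
--
--     for m in range(len(seq)):
--         factor = 0
--         for i in range(n - m + 1):
--             factor += a[i] * a[i + m]
--         factor -= R[m]
--
--         factor_list.append(factor)
--
--     return factor_list
-- ===== SOURCE B (Python) =====
-- def equationsMA(seq, R):
--     # Autocorrelation via full convolution with the reversed sequence:
--     # conv[k] = sum_{i+j=k} seq[i]*rev[j]; lag m is conv[n-1-m].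
--     n = len(seq)
--     rev = seq[::-1]
--     conv = [0] * (2 * n - 1)
--     for i in range(n):
--         for j in range(n):
--             conv[i + j] += seq[i] * rev[j]
--     return [conv[n - 1 - m] - R[m] for m in range(n)]
-- ===== Notes on version B (the rewrite author's own statement) =====
-- stated objective: alternative
-- what changed: B computes the full (2n-1)-term convolution of seq with its reversal and reads each lag-m autocorrelation off as convolution coefficient n-1-m, instead of A's direct per-lag gather sums; R is subtracted in a final comprehension.
import Mathlib
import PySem

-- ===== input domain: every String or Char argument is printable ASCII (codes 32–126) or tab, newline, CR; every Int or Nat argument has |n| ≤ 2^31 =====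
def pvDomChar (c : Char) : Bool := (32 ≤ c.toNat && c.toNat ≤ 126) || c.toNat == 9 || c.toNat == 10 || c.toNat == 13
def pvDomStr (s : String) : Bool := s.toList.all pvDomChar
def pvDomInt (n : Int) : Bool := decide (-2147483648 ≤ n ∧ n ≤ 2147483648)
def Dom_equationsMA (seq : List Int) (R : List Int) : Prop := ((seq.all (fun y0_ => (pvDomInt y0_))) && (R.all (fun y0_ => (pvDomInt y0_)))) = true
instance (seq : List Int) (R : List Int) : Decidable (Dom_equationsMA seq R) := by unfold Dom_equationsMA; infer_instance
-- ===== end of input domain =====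

-- B computes the full convolution of seq with its reversal and reads each lag off as a
-- convolution coefficient, instead of A's direct per-lag gather sums. Objective: alternative
-- algorithm, same O(n^2) cost.

-- ===== PORT A =====
-- literal port: a = copy of seq built by append; n = len(seq)-1; for each m a gather sum, minus R[m].
-- R[m] is PySem.List.pyGet?; the '.getD 0' never fires under Pre_ (m < len R).
def equationsMA (seq : List Int) (R : List Int) : List Int :=
  let a : List Int := seq.foldl (fun acc elem => acc ++ [elem]) []
  let n : Int := (seq.length : Int) - 1
  (PySem.List.pyRange 0 (seq.length : Int) 1).foldl
    (fun factor_list m =>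
      let factor : Int :=
        (PySem.List.pyRange 0 (n - m + 1) 1).foldl
          (fun f i => f + (PySem.List.pyGet? a i).getD 0 * (PySem.List.pyGet? a (i + m)).getD 0) 0
      let factor := factor - (PySem.List.pyGet? R m).getD 0
      factor_list ++ [factor]) []

-- ===== PORT B =====
-- literal port of Source B: rev = seq[::-1] (list reversal); conv = [0]*(2n-1); the double loop
-- accumulates seq[i]*rev[j] into conv[i+j] (all indices are in range, so getD/set are exact);
-- the final comprehension reads conv[n-1-m] and subtracts R[m] (PySem.List.pyGet?, as in A).
def equationsMA_alt (seq : List Int) (R : List Int) : List Int :=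
  let n : Nat := seq.length
  let rev : List Int := seq.reverse
  let conv : List Int := List.replicate (2 * n - 1) 0
  let conv :=
    (List.range n).foldl
      (fun cv i =>
        (List.range n).foldl
          (fun cv j => cv.set (i + j) (cv.getD (i + j) 0 + seq.getD i 0 * rev.getD j 0)) cv)
      conv
  (List.range n).map (fun m => conv.getD (n - 1 - m) 0 - (PySem.List.pyGet? R (m : Int)).getD 0)

-- ===== PRECONDITION & SPEC =====
-- Pre_ excludes exactly the inputs where Python A raises IndexError on R[m] (len(R) < len(seq));
-- B raises there too.
def Pre_equationsMA (seq : List Int) (R : List Int) : Prop := seq.length ≤ R.length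
instance (seq : List Int) (R : List Int) : Decidable (Pre_equationsMA seq R) := by unfold Pre_equationsMA; infer_instance
def pvWitness_equationsMA : List Int × List Int := ([1, 2, 3], [4, 0, -1])

def Spec_equationsMA (seq : List Int) (R : List Int) (out : List Int) : Prop := out = equationsMA_alt seq R
instance (seq : List Int) (R : List Int) (out : List Int) : Decidable (Spec_equationsMA seq R out) := by unfold Spec_equationsMA; infer_instance

-- ===== CLAIM (what is proved, stated in full; the proofs are below) =====
def Claim_equal_equationsMA : Prop := ∀ (seq : List Int) (R : List Int), Dom_equationsMA seq R → Pre_equationsMA seq R → Spec_equationsMA seq R (equationsMA seq R)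

-- ===== LEMMAS AND PROOFS =====

-- getD after set, with explicit index comparison
theorem pv_getD_set (l : List Int) (i : Nat) (a : Int) (m : Nat) :
    (l.set i a).getD m 0 = if i = m ∧ m < l.length then a else l.getD m 0 := by
  simp only [List.getD_eq_getElem?_getD, List.getElem?_set]
  by_cases h : i = m
  · subst h
    by_cases hl : i < l.length <;> simp [hl]
  · simp [h]

-- the inner scatter loop at offset 'off' preserves length
theorem pv_foldl_set_length (c : Nat → Int) (off k : Nat) (l : List Int) :
    ((List.range k).foldl (fun fl j => fl.set (off + j) (fl.getD (off + j) 0 + c j)) l).length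
      = l.length := by
  induction k generalizing l with
  | zero => rfl
  | succ k ih =>
      rw [List.range_succ, List.foldl_append]
      simp only [List.foldl_cons, List.foldl_nil, List.length_set]
      exact ih l

-- value of cell p after the inner scatter loop at offset 'off'
theorem pv_foldl_set_getD (c : Nat → Int) (off k : Nat) (l : List Int) (p : Nat) :
    ((List.range k).foldl (fun fl j => fl.set (off + j) (fl.getD (off + j) 0 + c j)) l).getD p 0
      = l.getD p 0 + if off ≤ p ∧ p < off + k ∧ p < l.length then c (p - off) else 0 := by
  induction k generalizing l with
  | zero =>
      simp only [List.range_zero, List.foldl_nil]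
      rw [if_neg (by omega)]
      ring
  | succ k ih =>
      rw [List.range_succ, List.foldl_append]
      simp only [List.foldl_cons, List.foldl_nil]
      rw [pv_getD_set, pv_foldl_set_length]
      by_cases hk : off + k = p
      · subst hk
        by_cases hl : off + k < l.length
        · rw [if_pos ⟨rfl, hl⟩, ih, if_neg (by omega), if_pos (by omega)]
          have h3 : off + k - off = k := by omega
          rw [h3]
          ring
        · rw [if_neg (by omega), ih, if_neg (by omega), if_neg (by omega)]
      · rw [if_neg (by omega), ih]
        congr 1
        have h2 : (off ≤ p ∧ p < off + (k + 1) ∧ p < l.length)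
            ↔ (off ≤ p ∧ p < off + k ∧ p < l.length) := by omega
        simp only [h2]

-- value of cell p after the full outer convolution loop
theorem pv_conv_getD (seq rev : List Int) (n cnt : Nat) (l : List Int) (p : Nat)
    (hl : l.length = 2 * n - 1) :
    ((List.range cnt).foldl
        (fun cv i => (List.range n).foldl
          (fun cv j => cv.set (i + j) (cv.getD (i + j) 0 + seq.getD i 0 * rev.getD j 0)) cv) l).getD p 0
      = l.getD p 0 +
        ((List.range cnt).map (fun i =>
          if i ≤ p ∧ p < i + n ∧ p < 2 * n - 1 then seq.getD i 0 * rev.getD (p - i) 0 else 0)).sum := by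
  induction cnt generalizing l with
  | zero => simp
  | succ cnt ih =>
      rw [List.range_succ, List.foldl_append]
      simp only [List.foldl_cons, List.foldl_nil]
      rw [pv_foldl_set_getD]
      have hlen : ((List.range cnt).foldl
          (fun cv i => (List.range n).foldl
            (fun cv j => cv.set (i + j) (cv.getD (i + j) 0 + seq.getD i 0 * rev.getD j 0)) cv) l).length
          = 2 * n - 1 := by
        clear ih
        induction cnt generalizing l with
        | zero => simpa using hl
        | succ cnt ih2 =>
            rw [List.range_succ, List.foldl_append]
            simp only [List.foldl_cons, List.foldl_nil]
            rw [pv_foldl_set_length, ih2 l hl]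
      rw [hlen, ih l hl, List.map_append, List.sum_append]
      simp [add_assoc]

-- a guarded sum over range n collapses to a sum over range k
theorem pv_sum_ite_range (t : Nat → Int) (n k : Nat) (hk : k ≤ n) :
    ((List.range n).map (fun i => if i < k then t i else 0)).sum
      = ((List.range k).map t).sum := by
  induction n with
  | zero =>
      have h0 : k = 0 := by omega
      simp [h0]
  | succ n ih =>
      rw [List.range_succ, List.map_append, List.sum_append]
      by_cases h : k = n + 1
      · subst h
        have h1 : (List.range n).map (fun i => if i < n + 1 then t i else 0)
            = (List.range n).map t := by
          apply List.map_congr_left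
          intro i hi
          rw [List.mem_range] at hi
          rw [if_pos (by omega)]
        rw [h1, List.range_succ, List.map_append, List.sum_append]
        simp
      · have hk' : k ≤ n := by omega
        have h2 : ¬ n < k := by omega
        simp [h2, ih hk']

-- closed form of port A: gather sums minus R (R.getD agrees with the Python R[m] under Pre_)
theorem pv_A_closed (seq R : List Int) :
    equationsMA seq R
      = (List.range seq.length).map (fun m =>
          ((List.range (seq.length - m)).map
            (fun i => seq.getD i 0 * seq.getD (i + m) 0)).sum - R.getD m 0) := by
  unfold equationsMA
  have ha : seq.foldl (fun acc elem => acc ++ [elem]) [] = seq := by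
    simpa using PySem.List.foldl_append_singleton_eq_map (l := seq) (f := id) (acc := [])
  simp only [ha]
  rw [PySem.List.foldl_append_singleton_eq_map, PySem.List.pyRange_zero_natCast, List.map_map]
  simp only [List.nil_append]
  apply List.map_congr_left
  intro m hm
  rw [List.mem_range] at hm
  simp only [Function.comp]
  have hb : (seq.length : Int) - 1 - (m : Int) + 1 = ((seq.length - m : Nat) : Int) := by
    push_cast [Nat.le_of_lt hm]
    ring
  rw [hb, PySem.List.pyRange_zero_natCast, List.foldl_map, PySem.List.foldl_add]
  have hRm : (PySem.List.pyGet? R (m : Int)).getD 0 = R.getD m 0 := by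
    simp [List.getD_eq_getElem?_getD]
  rw [hRm, zero_add]
  congr 1
  refine congrArg List.sum (List.map_congr_left ?_)
  intro i hi
  rw [List.mem_range] at hi
  have hseq : ∀ j : Nat, (PySem.List.pyGet? seq (j : Int)).getD 0 = seq.getD j 0 := by
    intro j
    simp [List.getD_eq_getElem?_getD]
  have hcast : (i : Int) + (m : Int) = ((i + m : Nat) : Int) := by push_cast; ring
  rw [hcast, hseq, hseq]

-- reading the reversed list at the mirrored index
theorem pv_getD_reverse (l : List Int) (j : Nat) (hj : j < l.length) :
    l.reverse.getD (l.length - 1 - j) 0 = l.getD j 0 := by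
  have h1 : l.length - 1 - j < l.reverse.length := by
    rw [List.length_reverse]
    omega
  rw [List.getD_eq_getElem?_getD, List.getD_eq_getElem?_getD,
    List.getElem?_eq_getElem h1, List.getElem?_eq_getElem hj, List.getElem_reverse]
  have h2 : l.length - 1 - (l.length - 1 - j) = j := by omega
  simp [h2]

-- closed form of port B: the convolution coefficient n-1-m is the same gather sum
theorem pv_B_closed (seq R : List Int) :
    equationsMA_alt seq R
      = (List.range seq.length).map (fun m =>
          ((List.range (seq.length - m)).map
            (fun i => seq.getD i 0 * seq.getD (i + m) 0)).sum - R.getD m 0) := by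
  unfold equationsMA_alt
  simp only []
  apply List.map_congr_left
  intro m hm
  rw [List.mem_range] at hm
  have hRm : (PySem.List.pyGet? R (m : Int)).getD 0 = R.getD m 0 := by
    simp [List.getD_eq_getElem?_getD]
  rw [hRm]
  congr 1
  set n := seq.length with hn
  rw [pv_conv_getD seq seq.reverse n n (List.replicate (2 * n - 1) 0) (n - 1 - m) (by simp)]
  have hz : (List.replicate (2 * n - 1) (0 : Int)).getD (n - 1 - m) 0 = 0 := by simp
  rw [hz, zero_add]
  have h1 : (List.range n).map (fun i =>
      if i ≤ n - 1 - m ∧ n - 1 - m < i + n ∧ n - 1 - m < 2 * n - 1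
      then seq.getD i 0 * seq.reverse.getD (n - 1 - m - i) 0 else 0)
      = (List.range n).map (fun i =>
      if i < n - m then seq.getD i 0 * seq.getD (i + m) 0 else 0) := by
    apply List.map_congr_left
    intro i hi
    rw [List.mem_range] at hi
    by_cases hc : i < n - m
    · rw [if_pos (by omega), if_pos hc]
      have hrev : seq.reverse.getD (n - 1 - m - i) 0 = seq.getD (i + m) 0 := by
        have hidx : n - 1 - m - i = seq.length - 1 - (i + m) := by omega
        rw [hidx, pv_getD_reverse seq (i + m) (by omega)]
      rw [hrev]
    · rw [if_neg (by omega), if_neg hc]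
  rw [h1, pv_sum_ite_range _ _ _ (by omega)]

-- ===== VERDICT (by name: the statement is the Claim_ definition above) =====
theorem equationsMA_spec : Claim_equal_equationsMA := by
  intro seq R _hDom _hPre
  unfold Spec_equationsMA
  rw [pv_A_closed, pv_B_closed]
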